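-- pv_equiv track=rewrite | github.com/jesussanchezoro/DAA-GIS-25-26 | 0_practicas/2_marvel_dc.py | bfs
-- ===== SOURCE A (Python) =====
-- from collections import deque
--
-- def bfsAux(g, visited, v, type, types):
--     q = deque()
--     visited[v] = True
--     q.append(v)
--     while q:
--         aux = q.popleft()
--         for adj in g[aux]:
--             if not visited[adj] and type == types[adj]:
--                 q.append(adj)
--                 visited[adj] = True
--
-- def bfs(g, type, types):
--     n = len(g)
--     visited = [False] * n
--     ncc = 0
--     for v in range(0, n):
--         if not visited[v] and type == types[v]:
--             bfsAux(g, visited, v, type, types)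
--             ncc += 1
--     return ncc
-- ===== SOURCE B (Python) =====
-- def bfs(g, type, types):
--     n = len(g)
--     visited = [False] * n
--     ncc = 0
--     for v in range(n):
--         if types[v] == type and not visited[v]:
--             ncc += 1
--             r = [False] * n
--             r[v] = True
--             changed = True
--             while changed:
--                 changed = False
--                 for u in range(n):
--                     if r[u]:
--                         for w in g[u]:
--                             if types[w] == type and not r[w]:
--                                 r[w] = True
--                                 changed = True
--             for u in range(n):
--                 if r[u]:
--                     visited[u] = True
--     return ncc
-- ===== Notes on version B (the rewrite author's own statement) =====
-- stated objective: alternative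
-- what changed: Replaces the shared-queue BFS per component with a per-root round-based saturation to a fixpoint (no queue: repeated full sweeps that add matching neighbours until the reachable set stabilises) whose result is then OR-ed into the visited array.
-- outside the precondition, e.g. on bfs([[-1], [9]], 1, [0, 0, 1]): A returns 0, B returns 0; on bfs([[-1], []], 1, [1]): A returns 1, B raises IndexError
import Mathlib
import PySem

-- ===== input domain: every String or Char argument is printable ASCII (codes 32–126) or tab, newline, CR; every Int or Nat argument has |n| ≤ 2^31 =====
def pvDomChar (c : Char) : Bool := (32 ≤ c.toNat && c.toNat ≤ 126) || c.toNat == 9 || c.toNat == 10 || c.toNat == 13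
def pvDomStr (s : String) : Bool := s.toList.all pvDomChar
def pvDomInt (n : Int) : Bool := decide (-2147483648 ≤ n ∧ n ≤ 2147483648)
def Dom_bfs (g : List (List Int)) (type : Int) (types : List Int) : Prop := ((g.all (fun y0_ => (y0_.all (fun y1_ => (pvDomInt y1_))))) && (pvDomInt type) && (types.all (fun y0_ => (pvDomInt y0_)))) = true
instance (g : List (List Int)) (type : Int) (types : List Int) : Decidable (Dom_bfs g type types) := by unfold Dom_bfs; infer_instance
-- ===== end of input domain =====

-- B replaces the per-component shared-queue BFS with a per-root sweep-to-fixpoint saturation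
-- (no queue) whose stabilised reachable set is OR-ed into the visited array; return values
-- proved equal on the well-formed graph inputs admitted by Pre_bfs.

-- ===== PORT A =====

-- helpers for the ports' loop termination (cited in decreasing_by)
theorem pvFoldlMeasureLe {α β : Type} (f : β → α → β) (m : β → Nat)
    (hf : ∀ b a, m (f b a) ≤ m b) : ∀ (l : List α) (b : β), m (l.foldl f b) ≤ m b := by
  intro l
  induction l with
  | nil => intro b; simp
  | cons a t ih => intro b; exact le_trans (ih (f b a)) (hf b a)

theorem pvCountFalseSet (xs : List Bool) (i : Nat) (h : xs.getD i true = false) :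
    (xs.set i true).count false + 1 = xs.count false := by
  induction xs generalizing i with
  | nil => simp [List.getD] at h
  | cons x t ih =>
    cases i with
    | zero =>
      simp only [List.getD_cons_zero] at h
      subst h
      simp
    | succ j =>
      simp only [List.getD_cons_succ] at h
      simp only [List.set_cons_succ, List.count_cons]
      have := ih j h
      omega

-- the Nat position a Python index a (possibly negative, in wrap range) denotes in a list of length n
def pyn (n : Nat) (a : Int) : Nat := (if a < 0 then a + n else a).toNat

theorem pyn_get {α : Type} (xs : List α) (a : Int) (d : α)
    (h1 : -(xs.length : Int) ≤ a) (h2 : a < xs.length) :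
    PySem.List.pyGetD xs a d = xs.getD (pyn xs.length a) d := by
  unfold PySem.List.pyGetD PySem.List.pyGet? PySem.List.pyIdx? pyn
  by_cases h : 0 ≤ a
  · rw [if_pos h, if_pos (by omega), if_neg (by omega)]
    simp [List.getD_eq_getElem?_getD]
  · rw [if_neg h, if_pos (by omega), if_pos (by omega)]
    have he : xs.length - (-a).toNat = (a + xs.length).toNat := by omega
    simp [List.getD_eq_getElem?_getD, he]

theorem pyn_set {α : Type} (xs : List α) (a : Int) (v : α)
    (h1 : -(xs.length : Int) ≤ a) (h2 : a < xs.length) :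
    PySem.List.pySetD xs a v = xs.set (pyn xs.length a) v := by
  unfold PySem.List.pySetD PySem.List.pySet? PySem.List.pyIdx? pyn
  by_cases h : 0 ≤ a
  · rw [if_pos h, if_pos (by omega), if_neg (by omega)]
    simp
  · rw [if_neg h, if_pos (by omega), if_pos (by omega)]
    have he : xs.length - (-a).toNat = (a + xs.length).toNat := by omega
    simp [he]

theorem pvInRangeOfGetDFalse (xs : List Bool) (a : Int)
    (h : PySem.List.pyGetD xs a true = false) :
    -(xs.length : Int) ≤ a ∧ a < xs.length := by
  unfold PySem.List.pyGetD PySem.List.pyGet? PySem.List.pyIdx? at h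
  by_cases h0 : 0 ≤ a
  · rw [if_pos h0] at h
    by_cases hlt : a < (xs.length : Int)
    · exact ⟨by omega, hlt⟩
    · rw [if_neg hlt] at h; simp at h
  · rw [if_neg h0] at h
    by_cases hge : -(xs.length : Int) ≤ a
    · exact ⟨hge, by omega⟩
    · rw [if_neg hge] at h; simp at h

theorem pvCountFalsePySet (xs : List Bool) (a : Int)
    (h : PySem.List.pyGetD xs a true = false) :
    (PySem.List.pySetD xs a true).count false + 1 = xs.count false := by
  obtain ⟨h1, h2⟩ := pvInRangeOfGetDFalse xs a h
  rw [pyn_set xs a true h1 h2]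
  apply pvCountFalseSet
  rw [pyn_get xs a true h1 h2] at h
  exact h

-- body of 'for adj in g[aux]: if not visited[adj] and type == types[adj]: q.append(adj); visited[adj] = True'
def bfsStep (type : Int) (types : List Int) (st : List Bool × List Int) (adj : Int) :
    List Bool × List Int :=
  if PySem.List.pyGetD st.1 adj true = false ∧ type = PySem.List.pyGetD types adj 0 then
    (PySem.List.pySetD st.1 adj true, st.2 ++ [adj])
  else st

theorem pvBfsStepLe (type : Int) (types : List Int) :
    ∀ (st : List Bool × List Int) (adj : Int),
      2 * (bfsStep type types st adj).1.count false + (bfsStep type types st adj).2.length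
        ≤ 2 * st.1.count false + st.2.length := by
  intro st adj
  unfold bfsStep
  split_ifs with h
  · have := pvCountFalsePySet st.1 adj h.1
    simp only [List.length_append, List.length_cons, List.length_nil]
    omega
  · exact le_refl _

-- the 'while q:' loop of bfsAux
def bfsAuxLoop (g : List (List Int)) (type : Int) (types : List Int) :
    List Bool → List Int → List Bool
  | visited, [] => visited
  | visited, aux :: qrest =>
    let st := (PySem.List.pyGetD g aux []).foldl (bfsStep type types) (visited, qrest)
    bfsAuxLoop g type types st.1 st.2
termination_by visited q => 2 * visited.count false + q.length
decreasing_by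
  have h := pvFoldlMeasureLe (bfsStep type types)
    (fun st => 2 * st.1.count false + st.2.length) (pvBfsStepLe type types)
    (PySem.List.pyGetD g aux []) (visited, qrest)
  dsimp only at h
  simp only [List.length_cons]
  omega

def bfs (g : List (List Int)) (type : Int) (types : List Int) : Int :=
  let n := g.length
  let st := (List.range n).foldl
    (fun (st : List Bool × Int) v =>
      if st.1.getD v false = false ∧ type = types.getD v 0 then
        (bfsAuxLoop g type types (st.1.set v true) [(v : Int)], st.2 + 1)
      else st)
    (List.replicate n false, 0)
  st.2

-- ===== PORT B =====

-- body of 'for w in g[u]: if types[w] == type and not r[w]: r[w] = True; changed = True'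
def satStep (type : Int) (types : List Int) (st : List Bool × Bool) (w : Int) :
    List Bool × Bool :=
  if PySem.List.pyGetD types w 0 = type ∧ PySem.List.pyGetD st.1 w true = false then
    (PySem.List.pySetD st.1 w true, true)
  else st

theorem pvSatStepLe (type : Int) (types : List Int) :
    ∀ (st : List Bool × Bool) (w : Int),
      (satStep type types st w).1.count false + (cond (satStep type types st w).2 1 0)
        ≤ st.1.count false + (cond st.2 1 0) := by
  intro st w
  unfold satStep
  split_ifs with h
  · have := pvCountFalsePySet st.1 w h.2
    cases st.2 <;> simp <;> omega
  · exact le_refl _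

-- one full sweep 'for u in range(n): if r[u]: for w in g[u]: …', returning (r, changed)
def satSweep (g : List (List Int)) (type : Int) (types : List Int) (r : List Bool) :
    List Bool × Bool :=
  (List.range g.length).foldl
    (fun (st : List Bool × Bool) u =>
      if st.1.getD u false = true then (g.getD u []).foldl (satStep type types) st else st)
    (r, false)

theorem pvSatSweepLe (g : List (List Int)) (type : Int) (types : List Int) (r : List Bool) :
    (satSweep g type types r).1.count false + (cond (satSweep g type types r).2 1 0)
      ≤ r.count false := by
  have h := pvFoldlMeasureLe
    (fun (st : List Bool × Bool) u =>
      if st.1.getD u false = true then (g.getD u []).foldl (satStep type types) st else st)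
    (fun st => st.1.count false + (cond st.2 1 0))
    (by
      intro b u
      dsimp only
      split_ifs with hb
      · exact pvFoldlMeasureLe (satStep type types)
          (fun st => st.1.count false + (cond st.2 1 0)) (pvSatStepLe type types)
          (g.getD u []) b
      · exact le_refl _)
    (List.range g.length) (r, false)
  simpa [satSweep] using h

-- the 'while changed:' saturation loop
def satFix (g : List (List Int)) (type : Int) (types : List Int) (r : List Bool) : List Bool :=
  let st := satSweep g type types r
  if st.2 = true then satFix g type types st.1 else st.1
termination_by r.count false
decreasing_by
  have h := pvSatSweepLe g type types r
  rename_i hchanged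
  rw [hchanged] at h
  simp only [cond_true] at h
  omega

def bfs_alt (g : List (List Int)) (type : Int) (types : List Int) : Int :=
  let n := g.length
  let st := (List.range n).foldl
    (fun (st : List Bool × Int) v =>
      if types.getD v 0 = type ∧ st.1.getD v false = false then
        let r := satFix g type types ((List.replicate n false).set v true)
        ((List.range n).foldl (fun vis u => if r.getD u false = true then vis.set u true else vis) st.1,
         st.2 + 1)
      else st)
    (List.replicate n false, 0)
  st.2

-- ===== PRECONDITION & SPEC =====
-- Pre_ restricts to well-formed graph inputs: at least one type entry per node and adjacency
-- entries inside Python's index wrap range [-n, n). Outside it Python A either raises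
-- IndexError or returns by accident of short-circuit evaluation / surplus types entries
-- read through a wrapped index (cites in claim.json).
def Pre_bfs (g : List (List Int)) (type : Int) (types : List Int) : Prop :=
  g.length ≤ types.length ∧
    ∀ u, u < g.length →
      (type = types.getD u 0 ∨
        ∃ row ∈ g, ∃ a ∈ row, pyn g.length a = u ∧ type = PySem.List.pyGetD types a 0) →
      ∀ a ∈ g.getD u [], -(g.length : Int) ≤ a ∧ a < (g.length : Int)
instance (g : List (List Int)) (type : Int) (types : List Int) : Decidable (Pre_bfs g type types) := by
  unfold Pre_bfs; infer_instance

def pvWitness_bfs : List (List Int) × Int × List Int := ([[1], [0], []], 5, [5, 5, 7])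

def Spec_bfs (g : List (List Int)) (type : Int) (types : List Int) (out : Int) : Prop := out = bfs_alt g type types
instance (g : List (List Int)) (type : Int) (types : List Int) (out : Int) : Decidable (Spec_bfs g type types out) := by unfold Spec_bfs; infer_instance

-- ===== CLAIM (what is proved, stated in full; the proofs are below) =====
def Claim_equal_bfs : Prop := ∀ (g : List (List Int)) (type : Int) (types : List Int), Dom_bfs g type types → Pre_bfs g type types → Spec_bfs g type types (bfs g type types)

-- ===== LEMMAS AND PROOFS =====

theorem pyn_lt (n : Nat) (a : Int) (h1 : -(n : Int) ≤ a) (h2 : a < n) : pyn n a < n := by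
  unfold pyn; split <;> omega

theorem pyn_natCast (n v : Nat) : pyn n (v : Int) = v := by unfold pyn; split <;> omega

-- 'node i is marked in the bool array vs'
def Mk (vs : List Bool) (i : Nat) : Prop := vs.getD i false = true

-- one admissible traversal edge: some raw entry a of node u's row denotes node w and passes the type test
def good (g : List (List Int)) (type : Int) (types : List Int) (u w : Nat) : Prop :=
  u < g.length ∧ w < g.length ∧
    ∃ a, a ∈ g.getD u [] ∧ pyn g.length a = w ∧ type = PySem.List.pyGetD types a 0

def Reach (g : List (List Int)) (type : Int) (types : List Int) (v w : Nat) : Prop :=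
  Relation.ReflTransGen (good g type types) v w

-- node u can be the target of the type test somewhere: directly, or through a raw row entry
def matchable (g : List (List Int)) (type : Int) (types : List Int) (u : Nat) : Prop :=
  type = types.getD u 0 ∨
    ∃ row ∈ g, ∃ a ∈ row, pyn g.length a = u ∧ type = PySem.List.pyGetD types a 0

def GoodBounds (g : List (List Int)) (type : Int) (types : List Int) : Prop :=
  ∀ u, u < g.length → matchable g type types u →
    ∀ a ∈ g.getD u [], -(g.length : Int) ≤ a ∧ a < (g.length : Int)

theorem matchable_good (g : List (List Int)) (type : Int) (types : List Int) (u w : Nat)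
    (h : good g type types u w) : matchable g type types w := by
  obtain ⟨hun, _, a, ha, hpyn, hraw⟩ := h
  exact Or.inr ⟨g.getD u [], by rw [List.getD_eq_getElem _ _ hun]; exact List.getElem_mem _,
    a, ha, hpyn, hraw⟩

-- queue invariant of A's BFS loop
def Bq (g : List (List Int)) (type : Int) (types : List Int)
    (vis : List Bool) (q : List Int) : Prop :=
  ∀ x ∈ q, Mk vis (pyn g.length x) ∧ -(g.length : Int) ≤ x ∧ x < g.length ∧
    matchable g type types (pyn g.length x)

-- A's loop may still process node u later (a raw index for it is queued), or u's neighbours are already marked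
def SemiClosed (g : List (List Int)) (type : Int) (types : List Int)
    (vis : List Bool) (q : List Int) : Prop :=
  ∀ u, Mk vis u → (∃ x ∈ q, pyn g.length x = u) ∨ ∀ w, good g type types u w → Mk vis w

theorem Mk_set_iff (vs : List Bool) (k i : Nat) (hk : k < vs.length) :
    Mk (vs.set k true) i ↔ (Mk vs i ∨ i = k) := by
  unfold Mk
  by_cases h : i = k
  · subst h; simp [List.getD_eq_getElem?_getD, hk]
  · simp [List.getD_eq_getElem?_getD, List.getElem?_set_ne (Ne.symm h), h]

theorem Mk_mono_set (vs : List Bool) (k i : Nat) (h : Mk vs i) : Mk (vs.set k true) i := by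
  unfold Mk at *
  by_cases hik : i = k
  · subst hik
    have hi : i < vs.length := by
      by_contra hge
      simp [List.getD_eq_getElem?_getD, List.getElem?_eq_none (Nat.le_of_not_lt hge)] at h
    simp [List.getD_eq_getElem?_getD, hi]
  · simpa [List.getD_eq_getElem?_getD, List.getElem?_set_ne (Ne.symm hik)] using h

theorem Mk_replicate (n i : Nat) : ¬ Mk (List.replicate n false) i := by
  unfold Mk; simp [List.getD_eq_getElem?_getD]

theorem mk_of_getD_true (vs : List Bool) (i : Nat) (hi : i < vs.length)
    (h : vs.getD i true = true) : Mk vs i := by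
  unfold Mk
  rw [List.getD_eq_getElem _ _ hi] at h ⊢
  exact h

theorem list_eq_of_Mk (a b : List Bool) (hlen : a.length = b.length)
    (h : ∀ i, Mk a i ↔ Mk b i) : a = b := by
  apply List.ext_getElem hlen
  intro i h1 h2
  have hh := h i
  unfold Mk at hh
  rw [List.getD_eq_getElem _ _ h1, List.getD_eq_getElem _ _ h2] at hh
  cases ha : a[i] <;> cases hb : b[i] <;> simp [ha, hb] at hh ⊢

theorem reach_lt (g : List (List Int)) (type : Int) (types : List Int) (v i : Nat)
    (hv : v < g.length) (h : Reach g type types v i) : i < g.length := by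
  induction h with
  | refl => exact hv
  | tail _ hstep _ => exact hstep.2.1

-- the inner 'for adj in g[aux]' fold of A
theorem bfsFold_spec (type : Int) (types : List Int) (g : List (List Int)) :
    ∀ (l : List Int), (∀ a ∈ l, -(g.length : Int) ≤ a ∧ a < (g.length : Int)) →
      (∀ a ∈ l, type = PySem.List.pyGetD types a 0 → matchable g type types (pyn g.length a)) →
    ∀ (vis : List Bool) (qs : List Int), vis.length = g.length →
      Bq g type types vis qs →
      (l.foldl (bfsStep type types) (vis, qs)).1.length = g.length ∧
      (∀ i, Mk vis i → Mk (l.foldl (bfsStep type types) (vis, qs)).1 i) ∧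
      (∀ x ∈ qs, x ∈ (l.foldl (bfsStep type types) (vis, qs)).2) ∧
      Bq g type types (l.foldl (bfsStep type types) (vis, qs)).1
        (l.foldl (bfsStep type types) (vis, qs)).2 ∧
      (∀ a ∈ l, type = PySem.List.pyGetD types a 0 →
        Mk (l.foldl (bfsStep type types) (vis, qs)).1 (pyn g.length a)) ∧
      (∀ i, Mk (l.foldl (bfsStep type types) (vis, qs)).1 i →
        Mk vis i ∨ ∃ a, a ∈ (l.foldl (bfsStep type types) (vis, qs)).2 ∧ a ∈ l ∧
          pyn g.length a = i ∧ type = PySem.List.pyGetD types a 0) := by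
  intro l
  induction l with
  | nil =>
    intro _ _ vis qs hlen hbq
    refine ⟨hlen, fun _ h => h, fun _ hx => hx, hbq, ?_, fun i hi => Or.inl hi⟩
    intro a ha; simp at ha
  | cons a t ih =>
    intro hl hlm vis qs hlen hbq
    have ha := hl a (List.mem_cons_self ..)
    have hb1 : -(vis.length : Int) ≤ a := by rw [hlen]; exact ha.1
    have hb2 : a < (vis.length : Int) := by rw [hlen]; exact ha.2
    have hpa : pyn g.length a < g.length := pyn_lt _ _ ha.1 ha.2
    have hka : pyn g.length a < vis.length := by rw [hlen]; exact hpa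
    have hpg : PySem.List.pyGetD vis a true = vis.getD (pyn g.length a) true := by
      rw [pyn_get vis a true hb1 hb2, hlen]
    have hps : PySem.List.pySetD vis a true = vis.set (pyn g.length a) true := by
      rw [pyn_set vis a true hb1 hb2, hlen]
    simp only [List.foldl_cons]
    by_cases hguard : vis.getD (pyn g.length a) true = false ∧ type = PySem.List.pyGetD types a 0
    · have hstep : bfsStep type types (vis, qs) a = (vis.set (pyn g.length a) true, qs ++ [a]) := by
        unfold bfsStep
        rw [if_pos ⟨hpg.trans hguard.1, hguard.2⟩, hps]
      rw [hstep]
      have hlen' : (vis.set (pyn g.length a) true).length = g.length := by simpa using hlen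
      have hbq' : Bq g type types (vis.set (pyn g.length a) true) (qs ++ [a]) := by
        intro x hx
        rcases List.mem_append.mp hx with hx | hx
        · obtain ⟨h1, h2, h3, h4⟩ := hbq x hx
          exact ⟨Mk_mono_set _ _ _ h1, h2, h3, h4⟩
        · simp only [List.mem_singleton] at hx; subst hx
          exact ⟨(Mk_set_iff _ _ _ hka).mpr (Or.inr rfl), ha.1, ha.2,
            hlm x (List.mem_cons_self ..) hguard.2⟩
      obtain ⟨c1, c2, c3, c4, c5, c6⟩ :=
        ih (fun b hb => hl b (List.mem_cons_of_mem _ hb))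
          (fun b hb => hlm b (List.mem_cons_of_mem _ hb)) (vis.set (pyn g.length a) true)
          (qs ++ [a]) hlen' hbq'
      refine ⟨c1, ?_, ?_, c4, ?_, ?_⟩
      · intro i hi; exact c2 i (Mk_mono_set _ _ _ hi)
      · intro x hx; exact c3 x (List.mem_append.mpr (Or.inl hx))
      · intro a' ha' hraw
        rcases List.mem_cons.mp ha' with ha' | ha'
        · subst ha'
          exact c2 _ ((Mk_set_iff _ _ _ hka).mpr (Or.inr rfl))
        · exact c5 a' ha' hraw
      · intro i hi
        rcases c6 i hi with hi' | ⟨a', hq, hlmem, hpyn', hraw'⟩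
        · rcases (Mk_set_iff vis (pyn g.length a) i hka).mp hi' with h | h
          · exact Or.inl h
          · subst h
            exact Or.inr ⟨a, c3 a (List.mem_append.mpr (Or.inr (List.mem_singleton.mpr rfl))),
              List.mem_cons_self .., rfl, hguard.2⟩
        · exact Or.inr ⟨a', hq, List.mem_cons_of_mem _ hlmem, hpyn', hraw'⟩
    · have hstep : bfsStep type types (vis, qs) a = (vis, qs) := by
        unfold bfsStep
        refine if_neg ?_
        intro hc
        exact hguard ⟨hpg.symm.trans hc.1, hc.2⟩
      rw [hstep]
      obtain ⟨c1, c2, c3, c4, c5, c6⟩ :=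
        ih (fun b hb => hl b (List.mem_cons_of_mem _ hb))
          (fun b hb => hlm b (List.mem_cons_of_mem _ hb)) vis qs hlen hbq
      refine ⟨c1, c2, c3, c4, ?_, ?_⟩
      · intro a' ha' hraw
        rcases List.mem_cons.mp ha' with ha' | ha'
        · subst ha'
          have htrue : vis.getD (pyn g.length a') true = true := by
            rcases not_and_or.mp hguard with h | h
            · cases hx : vis.getD (pyn g.length a') true
              · exact absurd hx h
              · rfl
            · exact absurd hraw h
          exact c2 _ (mk_of_getD_true vis _ hka htrue)
        · exact c5 a' ha' hraw
      · intro i hi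
        rcases c6 i hi with h | ⟨a', hq, hl2, hpyn', hraw'⟩
        · exact Or.inl h
        · exact Or.inr ⟨a', hq, List.mem_cons_of_mem _ hl2, hpyn', hraw'⟩

-- full spec of A's while-loop
theorem bfsAuxLoop_spec (g : List (List Int)) (type : Int) (types : List Int)
    (hg : GoodBounds g type types) :
    ∀ (vis : List Bool) (q : List Int), vis.length = g.length →
      Bq g type types vis q → SemiClosed g type types vis q →
      (bfsAuxLoop g type types vis q).length = g.length ∧
      (∀ i, Mk vis i → Mk (bfsAuxLoop g type types vis q) i) ∧
      (∀ u w, Mk (bfsAuxLoop g type types vis q) u → good g type types u w →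
        Mk (bfsAuxLoop g type types vis q) w) ∧
      (∀ P : Nat → Prop, (∀ u w, P u → good g type types u w → P w) →
        (∀ i, Mk vis i → P i) → ∀ i, Mk (bfsAuxLoop g type types vis q) i → P i) := by
  intro vis q
  induction vis, q using bfsAuxLoop.induct g type types with
  | case1 vis =>
    intro hlen hbq hsc
    simp only [bfsAuxLoop]
    refine ⟨hlen, fun _ h => h, ?_, fun P _ hinit i hi => hinit i hi⟩
    intro u w hu hgw
    rcases hsc u hu with ⟨x, hx, _⟩ | h
    · simp at hx
    · exact h w hgw
  | case2 vis aux qrest st ih =>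
    intro hlen hbq hsc
    obtain ⟨hmkaux, hbnd1, hbnd2, hmaux⟩ := hbq aux (List.mem_cons_self ..)
    have hpaux : pyn g.length aux < g.length := pyn_lt _ _ hbnd1 hbnd2
    have hrowq : PySem.List.pyGetD g aux [] = g.getD (pyn g.length aux) [] :=
      pyn_get g aux [] hbnd1 hbnd2
    have hrow : ∀ a ∈ PySem.List.pyGetD g aux [], -(g.length : Int) ≤ a ∧ a < (g.length : Int) := by
      intro a haref
      rw [hrowq] at haref
      exact hg _ hpaux hmaux a haref
    have hrowg : g.getD (pyn g.length aux) [] ∈ g := by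
      rw [List.getD_eq_getElem _ _ hpaux]; exact List.getElem_mem _
    have hlm : ∀ a ∈ PySem.List.pyGetD g aux [], type = PySem.List.pyGetD types a 0 →
        matchable g type types (pyn g.length a) := by
      intro a haref hraw
      rw [hrowq] at haref
      exact Or.inr ⟨g.getD (pyn g.length aux) [], hrowg, a, haref, rfl, hraw⟩
    have hbqrest : Bq g type types vis qrest := fun x hx => hbq x (List.mem_cons_of_mem _ hx)
    obtain ⟨c1, c2, c3, c4, c5, c6⟩ :=
      bfsFold_spec type types g (PySem.List.pyGetD g aux []) hrow hlm vis qrest hlen hbqrest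
    have hsc' : SemiClosed g type types st.1 st.2 := by
      intro u hu
      rcases c6 u hu with hold | ⟨a', hq, _, hpyn', _⟩
      · rcases hsc u hold with ⟨x, hx, hpx⟩ | hcl
        · rcases List.mem_cons.mp hx with he | hx
          · right
            intro w hgw
            obtain ⟨_, _, a', ha'row, hpyn', hraw'⟩ := hgw
            rw [← hpx, he, ← hrowq] at ha'row
            rw [← hpyn']
            exact c5 a' ha'row hraw'
          · exact Or.inl ⟨x, c3 x hx, hpx⟩
        · right; intro w hgw; exact c2 w (hcl w hgw)
      · exact Or.inl ⟨a', hq, hpyn'⟩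
    obtain ⟨d1, d2, d3, d4⟩ := ih c1 c4 hsc'
    have heq : bfsAuxLoop g type types vis (aux :: qrest) = bfsAuxLoop g type types st.1 st.2 := by
      rw [bfsAuxLoop]
    rw [heq]
    refine ⟨d1, ?_, d3, ?_⟩
    · intro i hi; exact d2 i (c2 i hi)
    · intro P hP hinit i hi
      apply d4 P hP _ i hi
      intro j hj
      rcases c6 j hj with hold | ⟨a', _, hal', hpyn', hraw'⟩
      · exact hinit j hold
      · refine hP (pyn g.length aux) j (hinit _ hmkaux) ?_
        have hjlt : j < g.length := by
          rw [← hpyn']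
          exact pyn_lt _ _ (hrow a' hal').1 (hrow a' hal').2
        rw [hrowq] at hal'
        exact ⟨hpaux, hjlt, a', hal', hpyn', hraw'⟩

-- one call of A's bfsAux marks exactly the old marks plus everything reachable from v
theorem bfsRoot (g : List (List Int)) (type : Int) (types : List Int)
    (hg : GoodBounds g type types) (vis : List Bool) (hlen : vis.length = g.length)
    (hcl : ∀ u w, Mk vis u → good g type types u w → Mk vis w)
    (v : Nat) (hv : type = types.getD v 0) (hvn : v < g.length) :
    (bfsAuxLoop g type types (vis.set v true) [(v : Int)]).length = g.length ∧
    (∀ i, Mk (bfsAuxLoop g type types (vis.set v true) [(v : Int)]) i ↔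
      (Mk vis i ∨ Reach g type types v i)) := by
  have hvv : v < vis.length := by rw [hlen]; exact hvn
  have hbq : Bq g type types (vis.set v true) [(v : Int)] := by
    intro x hx
    simp only [List.mem_singleton] at hx; subst hx
    refine ⟨?_, by omega, by exact_mod_cast hvn, ?_⟩
    · rw [pyn_natCast]
      exact (Mk_set_iff _ _ _ hvv).mpr (Or.inr rfl)
    · rw [pyn_natCast]
      exact Or.inl hv
  have hsc : SemiClosed g type types (vis.set v true) [(v : Int)] := by
    intro u hu
    rcases (Mk_set_iff vis v u hvv).mp hu with hold | he
    · right; intro w hgw; exact Mk_mono_set _ _ _ (hcl u w hold hgw)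
    · exact Or.inl ⟨(v : Int), List.mem_singleton.mpr rfl, by rw [pyn_natCast, he]⟩
  obtain ⟨d1, d2, d3, d4⟩ := bfsAuxLoop_spec g type types hg (vis.set v true) [(v : Int)]
    (by simpa using hlen) hbq hsc
  refine ⟨d1, ?_⟩
  intro i
  constructor
  · intro hi
    refine d4 (fun j => Mk vis j ∨ Reach g type types v j) ?_ ?_ i hi
    · intro u w hu hgw
      rcases hu with h | h
      · exact Or.inl (hcl u w h hgw)
      · exact Or.inr (Relation.ReflTransGen.tail h hgw)
    · intro j hj
      rcases (Mk_set_iff vis v j hvv).mp hj with h | h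
      · exact Or.inl h
      · exact h ▸ Or.inr Relation.ReflTransGen.refl
  · intro h
    rcases h with h | h
    · exact d2 i (Mk_mono_set _ _ _ h)
    · induction h with
      | refl => exact d2 v ((Mk_set_iff _ _ _ hvv).mpr (Or.inr rfl))
      | tail hr hstep ihr => exact d3 _ _ ihr hstep

-- the inner 'for w in g[u]' fold of B
theorem satFold_spec (type : Int) (types : List Int) (g : List (List Int)) :
    ∀ (l : List Int), (∀ a ∈ l, -(g.length : Int) ≤ a ∧ a < (g.length : Int)) →
    ∀ (st0 : List Bool × Bool), st0.1.length = g.length →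
      (l.foldl (satStep type types) st0).1.length = g.length ∧
      (∀ i, Mk st0.1 i → Mk (l.foldl (satStep type types) st0).1 i) ∧
      (st0.2 = true → (l.foldl (satStep type types) st0).2 = true) ∧
      ((l.foldl (satStep type types) st0).2 = false → (l.foldl (satStep type types) st0).1 = st0.1) ∧
      (∀ a ∈ l, type = PySem.List.pyGetD types a 0 →
        Mk (l.foldl (satStep type types) st0).1 (pyn g.length a)) ∧
      (∀ i, Mk (l.foldl (satStep type types) st0).1 i →
        Mk st0.1 i ∨ ∃ a, a ∈ l ∧ pyn g.length a = i ∧ type = PySem.List.pyGetD types a 0) := by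
  intro l
  induction l with
  | nil =>
    intro _ st0 hlen
    refine ⟨hlen, fun _ h => h, fun h => h, fun _ => rfl, ?_, fun i hi => Or.inl hi⟩
    intro a ha; simp at ha
  | cons a t ih =>
    intro hl st0 hlen
    have ha := hl a (List.mem_cons_self ..)
    have hb1 : -(st0.1.length : Int) ≤ a := by rw [hlen]; exact ha.1
    have hb2 : a < (st0.1.length : Int) := by rw [hlen]; exact ha.2
    have hpa : pyn g.length a < g.length := pyn_lt _ _ ha.1 ha.2
    have hka : pyn g.length a < st0.1.length := by rw [hlen]; exact hpa
    have hpg : PySem.List.pyGetD st0.1 a true = st0.1.getD (pyn g.length a) true := by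
      rw [pyn_get st0.1 a true hb1 hb2, hlen]
    have hps : PySem.List.pySetD st0.1 a true = st0.1.set (pyn g.length a) true := by
      rw [pyn_set st0.1 a true hb1 hb2, hlen]
    simp only [List.foldl_cons]
    by_cases hguard : PySem.List.pyGetD types a 0 = type ∧ st0.1.getD (pyn g.length a) true = false
    · have hstep : satStep type types st0 a = (st0.1.set (pyn g.length a) true, true) := by
        unfold satStep
        rw [if_pos ⟨hguard.1, hpg.trans hguard.2⟩, hps]
      rw [hstep]
      obtain ⟨c1, c2, c3, c4, c5, c6⟩ :=
        ih (fun b hb => hl b (List.mem_cons_of_mem _ hb)) (st0.1.set (pyn g.length a) true, true)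
          (by simpa using hlen)
      refine ⟨c1, ?_, fun _ => c3 rfl, ?_, ?_, ?_⟩
      · intro i hi; exact c2 i (Mk_mono_set _ _ _ hi)
      · intro hf; rw [c3 rfl] at hf; cases hf
      · intro a' ha' hraw
        rcases List.mem_cons.mp ha' with ha' | ha'
        · subst ha'
          exact c2 _ ((Mk_set_iff _ _ _ hka).mpr (Or.inr rfl))
        · exact c5 a' ha' hraw
      · intro i hi
        rcases c6 i hi with hi' | ⟨a', hlmem, hpyn', hraw'⟩
        · rcases (Mk_set_iff st0.1 (pyn g.length a) i hka).mp hi' with h | h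
          · exact Or.inl h
          · subst h
            exact Or.inr ⟨a, List.mem_cons_self .., rfl, hguard.1.symm⟩
        · exact Or.inr ⟨a', List.mem_cons_of_mem _ hlmem, hpyn', hraw'⟩
    · have hstep : satStep type types st0 a = st0 := by
        unfold satStep
        refine if_neg ?_
        intro hc
        exact hguard ⟨hc.1, hpg.symm.trans hc.2⟩
      rw [hstep]
      obtain ⟨c1, c2, c3, c4, c5, c6⟩ :=
        ih (fun b hb => hl b (List.mem_cons_of_mem _ hb)) st0 hlen
      refine ⟨c1, c2, c3, c4, ?_, ?_⟩
      · intro a' ha' hraw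
        rcases List.mem_cons.mp ha' with ha' | ha'
        · subst ha'
          have htrue : st0.1.getD (pyn g.length a') true = true := by
            rcases not_and_or.mp hguard with h | h
            · exact absurd hraw.symm h
            · cases hx : st0.1.getD (pyn g.length a') true
              · exact absurd hx h
              · rfl
          exact c2 _ (mk_of_getD_true st0.1 _ hka htrue)
        · exact c5 a' ha' hraw
      · intro i hi
        rcases c6 i hi with h | ⟨a', hl2, hpyn', hraw'⟩
        · exact Or.inl h
        · exact Or.inr ⟨a', List.mem_cons_of_mem _ hl2, hpyn', hraw'⟩

-- generic-list version of one sweep of B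
theorem satSweepAux (g : List (List Int)) (type : Int) (types : List Int)
    (hg : GoodBounds g type types) (P : Nat → Prop)
    (hP : ∀ u w, P u → good g type types u w → P w) :
    ∀ (l : List Nat), (∀ u ∈ l, u < g.length) →
    ∀ (st0 : List Bool × Bool), st0.1.length = g.length →
      (∀ i, Mk st0.1 i → matchable g type types i) →
      (∀ i, Mk st0.1 i → P i) →
      (l.foldl (fun (st : List Bool × Bool) u =>
          if st.1.getD u false = true then (g.getD u []).foldl (satStep type types) st else st)
        st0).1.length = g.length ∧
      (∀ i, Mk st0.1 i → Mk (l.foldl (fun (st : List Bool × Bool) u =>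
          if st.1.getD u false = true then (g.getD u []).foldl (satStep type types) st else st)
        st0).1 i) ∧
      (∀ i, Mk (l.foldl (fun (st : List Bool × Bool) u =>
          if st.1.getD u false = true then (g.getD u []).foldl (satStep type types) st else st)
        st0).1 i → P i) ∧
      (st0.2 = true → (l.foldl (fun (st : List Bool × Bool) u =>
          if st.1.getD u false = true then (g.getD u []).foldl (satStep type types) st else st)
        st0).2 = true) ∧
      ((l.foldl (fun (st : List Bool × Bool) u =>
          if st.1.getD u false = true then (g.getD u []).foldl (satStep type types) st else st)
        st0).2 = false →
        (l.foldl (fun (st : List Bool × Bool) u =>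
          if st.1.getD u false = true then (g.getD u []).foldl (satStep type types) st else st)
        st0).1 = st0.1 ∧
        (∀ u ∈ l, Mk st0.1 u → ∀ a ∈ g.getD u [], type = PySem.List.pyGetD types a 0 →
          Mk st0.1 (pyn g.length a))) := by
  intro l
  induction l with
  | nil =>
    intro _ st0 hlen _ hP0
    exact ⟨hlen, fun _ h => h, hP0, fun h => h, fun _ => ⟨rfl, by simp⟩⟩
  | cons u t ih =>
    intro hl st0 hlen hMb hP0
    have hu := hl u (List.mem_cons_self ..)
    have hrowg : g.getD u [] ∈ g := by
      rw [List.getD_eq_getElem _ _ hu]; exact List.getElem_mem _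
    simp only [List.foldl_cons]
    by_cases hb : st0.1.getD u false = true
    · rw [if_pos hb]
      have hMk0u : Mk st0.1 u := hb
      have hrow : ∀ a ∈ g.getD u [], -(g.length : Int) ≤ a ∧ a < (g.length : Int) :=
        hg u hu (hMb u hMk0u)
      obtain ⟨e1, e2, e3, e4, e5, e6⟩ :=
        satFold_spec type types g (g.getD u []) hrow st0 hlen
      have hP1 : ∀ i, Mk ((g.getD u []).foldl (satStep type types) st0).1 i → P i := by
        intro i hi
        rcases e6 i hi with h | ⟨a', hal', hpyn', hraw'⟩
        · exact hP0 i h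
        · refine hP u i (hP0 u hMk0u) ?_
          have hilt : i < g.length := by
            rw [← hpyn']
            exact pyn_lt _ _ (hrow a' hal').1 (hrow a' hal').2
          exact ⟨hu, hilt, a', hal', hpyn', hraw'⟩
      have hMb1 : ∀ i, Mk ((g.getD u []).foldl (satStep type types) st0).1 i →
          matchable g type types i := by
        intro i hi
        rcases e6 i hi with h | ⟨a', hal', hpyn', hraw'⟩
        · exact hMb i h
        · exact Or.inr ⟨g.getD u [], hrowg, a', hal', hpyn', hraw'⟩
      obtain ⟨f1, f2, f3, f4, f5⟩ :=
        ih (fun b hb2 => hl b (List.mem_cons_of_mem _ hb2))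
          ((g.getD u []).foldl (satStep type types) st0) e1 hMb1 hP1
      refine ⟨f1, ?_, f3, ?_, ?_⟩
      · intro i hi; exact f2 i (e2 i hi)
      · intro h0; exact f4 (e3 h0)
      · intro hf
        have hst1flag : ((g.getD u []).foldl (satStep type types) st0).2 = false := by
          cases hx : ((g.getD u []).foldl (satStep type types) st0).2
          · rfl
          · rw [f4 hx] at hf; cases hf
        have hst1 := e4 hst1flag
        obtain ⟨hfin, hclt⟩ := f5 hf
        rw [hst1] at hfin hclt
        refine ⟨hfin, ?_⟩
        intro x hx hmkx a ha hraw
        rcases List.mem_cons.mp hx with hxu | hxt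
        · subst hxu
          have := e5 a ha hraw
          rwa [hst1] at this
        · exact hclt x hxt hmkx a ha hraw
    · rw [if_neg hb]
      obtain ⟨f1, f2, f3, f4, f5⟩ :=
        ih (fun b hb2 => hl b (List.mem_cons_of_mem _ hb2)) st0 hlen hMb hP0
      refine ⟨f1, f2, f3, f4, ?_⟩
      intro hf
      obtain ⟨hfin, hclt⟩ := f5 hf
      refine ⟨hfin, ?_⟩
      intro x hx hmkx a ha hraw
      rcases List.mem_cons.mp hx with hxu | hxt
      · subst hxu; exact absurd hmkx hb
      · exact hclt x hxt hmkx a ha hraw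

-- spec of B's saturation loop: it computes a closed superset, sound for every closed P
theorem satFix_spec (g : List (List Int)) (type : Int) (types : List Int)
    (hg : GoodBounds g type types) :
    ∀ (r : List Bool), r.length = g.length → (∀ i, Mk r i → matchable g type types i) →
      (satFix g type types r).length = g.length ∧
      (∀ i, Mk r i → Mk (satFix g type types r) i) ∧
      (∀ u w, Mk (satFix g type types r) u → good g type types u w →
        Mk (satFix g type types r) w) ∧
      (∀ P : Nat → Prop, (∀ u w, P u → good g type types u w → P w) →
        (∀ i, Mk r i → P i) → ∀ i, Mk (satFix g type types r) i → P i) := by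
  have hmem : ∀ u ∈ List.range g.length, u < g.length := fun u hu => List.mem_range.mp hu
  intro r
  induction r using satFix.induct g type types with
  | case1 r st hch ih =>
    intro hlen hMb
    obtain ⟨s1, s2, sm, _, _⟩ := satSweepAux g type types hg (matchable g type types)
      (fun u w _ hgw => matchable_good g type types u w hgw) (List.range g.length) hmem
      (r, false) hlen hMb hMb
    have heq : satFix g type types r = satFix g type types (satSweep g type types r).1 := by
      conv_lhs => rw [satFix]
      exact if_pos hch
    obtain ⟨d1, d2, d3, d4⟩ := ih s1 sm
    rw [heq]
    refine ⟨d1, ?_, d3, ?_⟩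
    · intro i hi; exact d2 i (s2 i hi)
    · intro P hP hP0 i hi
      obtain ⟨_, _, p3, _, _⟩ := satSweepAux g type types hg P hP (List.range g.length) hmem
        (r, false) hlen hMb hP0
      exact d4 P hP p3 i hi
  | case2 r st hch =>
    intro hlen hMb
    have hch' : (satSweep g type types r).2 = false := by
      cases hx : (satSweep g type types r).2
      · rfl
      · exact absurd hx hch
    obtain ⟨s1, s2, _, s4, s5⟩ := satSweepAux g type types hg (matchable g type types)
      (fun u w _ hgw => matchable_good g type types u w hgw) (List.range g.length) hmem
      (r, false) hlen hMb hMb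
    obtain ⟨hfin, hcl⟩ := s5 hch'
    have hfin' : (satSweep g type types r).1 = r := hfin
    have heq : satFix g type types r = (satSweep g type types r).1 := by
      conv_lhs => rw [satFix]
      exact if_neg hch
    rw [heq, hfin']
    refine ⟨hlen, fun _ h => h, ?_, fun P hP hP0 i hi => hP0 i hi⟩
    intro u w hu hgw
    obtain ⟨hun, _, a, ha, hpyn, hraw⟩ := hgw
    rw [← hpyn]
    exact hcl u (List.mem_range.mpr hun) hu a ha hraw

-- B's saturation from the singleton {v} computes exactly the reachable set of v
theorem satRoot (g : List (List Int)) (type : Int) (types : List Int)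
    (hg : GoodBounds g type types) (v : Nat) (hv : type = types.getD v 0)
    (hvn : v < g.length) :
    ∀ i, Mk (satFix g type types ((List.replicate g.length false).set v true)) i ↔
      Reach g type types v i := by
  have hlen0 : ((List.replicate g.length false).set v true).length = g.length := by simp
  have hvr : v < (List.replicate g.length false).length := by simpa using hvn
  have hmk0 : ∀ i, Mk ((List.replicate g.length false).set v true) i ↔ i = v := by
    intro i
    rw [Mk_set_iff _ _ _ hvr]
    exact ⟨fun h => h.resolve_left (Mk_replicate _ _), Or.inr⟩
  have hMb0 : ∀ i, Mk ((List.replicate g.length false).set v true) i →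
      matchable g type types i := by
    intro i hi; rw [(hmk0 i).mp hi]; exact Or.inl hv
  obtain ⟨d1, d2, d3, d4⟩ := satFix_spec g type types hg _ hlen0 hMb0
  intro i
  constructor
  · intro hi
    refine d4 (Reach g type types v)
      (fun u w hu hgw => Relation.ReflTransGen.tail hu hgw) ?_ i hi
    intro j hj
    rw [(hmk0 j).mp hj]
    exact Relation.ReflTransGen.refl
  · intro h
    induction h with
    | refl => exact d2 v ((hmk0 v).mpr rfl)
    | tail _ hstep ihr => exact d3 _ _ ihr hstep

-- B's final marking loop ORs r into vis
theorem markFold_spec (r : List Bool) (n : Nat) :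
    ∀ (l : List Nat), (∀ u ∈ l, u < n) → ∀ (vis : List Bool), vis.length = n →
      (l.foldl (fun vis u => if r.getD u false = true then vis.set u true else vis) vis).length = n ∧
      (∀ i, Mk (l.foldl (fun vis u => if r.getD u false = true then vis.set u true else vis) vis) i ↔
        (Mk vis i ∨ (i ∈ l ∧ Mk r i))) := by
  intro l
  induction l with
  | nil =>
    intro _ vis hlen
    refine ⟨hlen, fun i => ?_⟩
    simp
  | cons u t ih =>
    intro hl vis hlen
    have hu := hl u (List.mem_cons_self ..)
    have huv : u < vis.length := by rw [hlen]; exact hu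
    simp only [List.foldl_cons]
    by_cases hr : r.getD u false = true
    · rw [if_pos hr]
      obtain ⟨f1, f2⟩ := ih (fun b hb => hl b (List.mem_cons_of_mem _ hb))
        (vis.set u true) (by simpa using hlen)
      refine ⟨f1, fun i => ?_⟩
      rw [f2 i, Mk_set_iff _ _ _ huv]
      constructor
      · rintro ((h | h) | ⟨h1, h2⟩)
        · exact Or.inl h
        · exact Or.inr ⟨List.mem_cons.mpr (Or.inl h), h ▸ hr⟩
        · exact Or.inr ⟨List.mem_cons_of_mem _ h1, h2⟩
      · rintro (h | ⟨h1, h2⟩)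
        · exact Or.inl (Or.inl h)
        · rcases List.mem_cons.mp h1 with h1 | h1
          · exact Or.inl (Or.inr h1)
          · exact Or.inr ⟨h1, h2⟩
    · rw [if_neg hr]
      obtain ⟨f1, f2⟩ := ih (fun b hb => hl b (List.mem_cons_of_mem _ hb)) vis hlen
      refine ⟨f1, fun i => ?_⟩
      rw [f2 i]
      constructor
      · rintro (h | ⟨h1, h2⟩)
        · exact Or.inl h
        · exact Or.inr ⟨List.mem_cons_of_mem _ h1, h2⟩
      · rintro (h | ⟨h1, h2⟩)
        · exact Or.inl h
        · rcases List.mem_cons.mp h1 with h1 | h1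
          · exact absurd (h1 ▸ h2) hr
          · exact Or.inr ⟨h1, h2⟩

-- the two outer 'for v in range(n)' loops agree step by step
theorem outer_eq (g : List (List Int)) (type : Int) (types : List Int)
    (hg : GoodBounds g type types) :
    ∀ (l : List Nat), (∀ u ∈ l, u < g.length) → ∀ (vis : List Bool) (ncc : Int),
      vis.length = g.length →
      (∀ u w, Mk vis u → good g type types u w → Mk vis w) →
      (l.foldl (fun (st : List Bool × Int) v =>
          if st.1.getD v false = false ∧ type = types.getD v 0 then
            (bfsAuxLoop g type types (st.1.set v true) [(v : Int)], st.2 + 1)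
          else st) (vis, ncc)).2
      = (l.foldl (fun (st : List Bool × Int) v =>
          if types.getD v 0 = type ∧ st.1.getD v false = false then
            let r := satFix g type types ((List.replicate g.length false).set v true)
            ((List.range g.length).foldl
              (fun vis u => if r.getD u false = true then vis.set u true else vis) st.1,
             st.2 + 1)
          else st) (vis, ncc)).2 := by
  intro l
  induction l with
  | nil => intro _ vis ncc _ _; rfl
  | cons v t ih =>
    intro hl vis ncc hlen hcl
    have hv := hl v (List.mem_cons_self ..)
    have hlt : ∀ u ∈ t, u < g.length := fun b hb => hl b (List.mem_cons_of_mem _ hb)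
    have hrange : ∀ u ∈ List.range g.length, u < g.length := fun u hu => List.mem_range.mp hu
    simp only [List.foldl_cons]
    by_cases h2 : type = types.getD v 0
    · by_cases h1 : vis.getD v false = false
      · rw [if_pos ⟨h1, h2⟩, if_pos ⟨h2.symm, h1⟩]
        obtain ⟨a1, a2⟩ := bfsRoot g type types hg vis hlen hcl v h2 hv
        have hR := satRoot g type types hg v h2 hv
        obtain ⟨m1, m2⟩ := markFold_spec
          (satFix g type types ((List.replicate g.length false).set v true)) g.length
          (List.range g.length) hrange vis hlen
        have hAB : bfsAuxLoop g type types (vis.set v true) [(v : Int)]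
            = (List.range g.length).foldl
                (fun vis2 u => if (satFix g type types
                    ((List.replicate g.length false).set v true)).getD u false = true
                  then vis2.set u true else vis2) vis := by
          apply list_eq_of_Mk _ _ (by rw [a1, m1])
          intro i
          rw [a2 i, m2 i]
          constructor
          · rintro (h | h)
            · exact Or.inl h
            · exact Or.inr ⟨List.mem_range.mpr (reach_lt g type types v i hv h), (hR i).mpr h⟩
          · rintro (h | ⟨_, h⟩)
            · exact Or.inl h
            · exact Or.inr ((hR i).mp h)
        have hcl' : ∀ u w, Mk ((List.range g.length).foldl
              (fun vis2 u => if (satFix g type types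
                  ((List.replicate g.length false).set v true)).getD u false = true
                then vis2.set u true else vis2) vis) u → good g type types u w →
            Mk ((List.range g.length).foldl
              (fun vis2 u => if (satFix g type types
                  ((List.replicate g.length false).set v true)).getD u false = true
                then vis2.set u true else vis2) vis) w := by
          intro u w hu hgw
          rcases (m2 u).mp hu with h | ⟨_, h⟩
          · exact (m2 w).mpr (Or.inl (hcl u w h hgw))
          · have hrw : Reach g type types v w :=
              Relation.ReflTransGen.tail ((hR u).mp h) hgw
            exact (m2 w).mpr (Or.inr ⟨List.mem_range.mpr hgw.2.1, (hR w).mpr hrw⟩)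
        rw [hAB]
        exact ih hlt _ (ncc + 1) m1 hcl'
      · rw [if_neg (fun hh => h1 hh.1), if_neg (fun hh => h1 hh.2)]
        exact ih hlt vis ncc hlen hcl
    · rw [if_neg (fun hh => h2 hh.2), if_neg (fun hh => h2 hh.1.symm)]
      exact ih hlt vis ncc hlen hcl

-- ===== VERDICT (by name: the statement is the Claim_ definition above) =====
theorem bfs_spec : Claim_equal_bfs := by
  intro g type types _hdom hpre
  unfold Spec_bfs bfs bfs_alt
  exact outer_eq g type types hpre.2 (List.range g.length)
    (fun u hu => List.mem_range.mp hu) (List.replicate g.length false) 0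
    (by simp) (fun u w hu _ => absurd hu (Mk_replicate _ _))
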